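-- pv_equiv track=rewrite | github.com/abdulsgilal579/repo-exercise | supermarket_queue.py | queue_time
-- ===== SOURCE A (Python) =====
-- def queue_time(customers, n):
--     if not customers:
--         return 0
--     if n==1:
--         return sum(customers)
--     till_list = [0] * n
--
--     for customers_time in customers:
--         lest_busy_till = till_list.index(min(till_list))
--         till_list[lest_busy_till] += customers_time
--     return max(till_list)
-- ===== SOURCE B (Python) =====
-- def queue_time(customers, n):
--     if not customers:
--         return 0
--     loads = [0] * n                 # till loads, kept sorted ascending
--     for c in customers:
--         t = loads[0] + c            # least-busy till takes the customer
--         rest = loads[1:]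
--         i = 0
--         while i < len(rest) and rest[i] <= t:
--             i += 1
--         loads = rest[:i] + [t] + rest[i:]   # re-insert, keeping the list sorted
--     return loads[-1]                # largest load = total time
-- ===== Notes on version B (the rewrite author's own statement) =====
-- stated objective: alternative
-- what changed: B keeps the till loads as a sorted list and serves each customer from its head, re-inserting the updated load in order, instead of A's per-customer min()+index() scan and in-place update; the n==1 special case disappears.
import Mathlib
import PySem

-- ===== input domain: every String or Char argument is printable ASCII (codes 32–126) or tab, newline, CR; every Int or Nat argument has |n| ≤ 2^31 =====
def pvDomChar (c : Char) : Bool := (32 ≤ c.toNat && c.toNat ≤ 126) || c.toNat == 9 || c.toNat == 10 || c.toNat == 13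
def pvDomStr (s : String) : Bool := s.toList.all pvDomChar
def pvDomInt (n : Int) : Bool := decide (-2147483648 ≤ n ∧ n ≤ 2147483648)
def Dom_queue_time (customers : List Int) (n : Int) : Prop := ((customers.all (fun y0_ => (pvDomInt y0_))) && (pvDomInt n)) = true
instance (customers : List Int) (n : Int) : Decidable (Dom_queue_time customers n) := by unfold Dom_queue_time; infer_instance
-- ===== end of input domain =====

-- B keeps the till loads sorted and serves the head till, replacing A's min+index scan; same return value.

-- ===== PORT A =====
-- one iteration of A's for-loop; `none` = a raised exception (min() of an empty list)
def stepA (acc : Option (List Int)) (c : Int) : Option (List Int) :=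
  match acc with
  | none => none
  | some t =>
    match PySem.List.min? t (fun y => y) with
    | none => none
    | some m =>
      match PySem.List.index? t m with
      | none => none
      | some i => some (t.set i (t.getD i 0 + c))

def queue_time (customers : List Int) (n : Int) : Int :=
  if customers = [] then 0
  else if n = 1 then customers.sum
  else
    match customers.foldl stepA (some (PySem.List.pyRepeat [0] n)) with
    | none => 0   -- unreachable under Pre_: the loop raised
    | some t => (PySem.List.max? t (fun y => y)).getD 0

-- ===== PORT B =====
-- one iteration of B's for-loop; `[]` stays `[]` (loads[0] raises there, outside Pre_).
-- Source B scans for i = number of leading elements ≤ t and splices rest[:i] + [t] + rest[i:];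
-- that prefix/suffix pair is exactly takeWhile/dropWhile.
def stepB (l : List Int) (c : Int) : List Int :=
  match l with
  | [] => []
  | h :: r => r.takeWhile (· ≤ h + c) ++ (h + c) :: r.dropWhile (· ≤ h + c)

def queue_time_alt (customers : List Int) (n : Int) : Int :=
  if customers = [] then 0
  else
    (PySem.List.pyGet? (customers.foldl stepB (PySem.List.pyRepeat [0] n)) (-1)).getD 0

-- ===== PRECONDITION & SPEC =====
-- Pre_ excludes only the inputs where A raises: customers ≠ [] with n < 1
-- (min([]) raises ValueError in A; B raises IndexError there too).
def Pre_queue_time (customers : List Int) (n : Int) : Prop := customers = [] ∨ 1 ≤ n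
instance (customers : List Int) (n : Int) : Decidable (Pre_queue_time customers n) := by unfold Pre_queue_time; infer_instance
def pvWitness_queue_time : List Int × Int := ([5, 3, 4], 2)

def Spec_queue_time (customers : List Int) (n : Int) (out : Int) : Prop := out = queue_time_alt customers n
instance (customers : List Int) (n : Int) (out : Int) : Decidable (Spec_queue_time customers n out) := by unfold Spec_queue_time; infer_instance

-- ===== CLAIM (what is proved, stated in full; the proofs are below) =====
def Claim_equal_queue_time : Prop := ∀ (customers : List Int) (n : Int), Dom_queue_time customers n → Pre_queue_time customers n → Spec_queue_time customers n (queue_time customers n)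

-- ===== LEMMAS AND PROOFS =====

-- proof-side recursive view of B's insertion step
def ordIns (t : Int) : List Int → List Int
  | [] => [t]
  | h :: r => if h ≤ t then h :: ordIns t r else t :: h :: r

theorem stepB_cons (h c : Int) (r : List Int) : stepB (h :: r) c = ordIns (h + c) r := by
  induction r with
  | nil => simp [stepB, ordIns]
  | cons x xs ih =>
    simp only [stepB] at ih ⊢
    simp only [ordIns, List.takeWhile, List.dropWhile]
    by_cases hx : x ≤ h + c
    · simp [hx, ← ih]
    · simp [hx]

theorem ordIns_perm (t : Int) (l : List Int) : (ordIns t l).Perm (t :: l) := by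
  induction l with
  | nil => simp [ordIns]
  | cons h r ih =>
    simp only [ordIns]
    split
    · exact ((ih.cons h).trans (List.Perm.swap t h r))
    · exact List.Perm.refl _

theorem ordIns_sorted (t : Int) (l : List Int) (hs : l.Pairwise (· ≤ ·)) :
    (ordIns t l).Pairwise (· ≤ ·) := by
  induction l with
  | nil => simp [ordIns]
  | cons h r ih =>
    rw [List.pairwise_cons] at hs
    simp only [ordIns]
    split
    · rename_i hht
      rw [List.pairwise_cons]
      refine ⟨fun b hb => ?_, ih hs.2⟩
      rcases List.mem_cons.mp ((ordIns_perm t r).mem_iff.mp hb) with rfl | hb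
      · exact hht
      · exact hs.1 b hb
    · rename_i hht
      rw [List.pairwise_cons]
      refine ⟨fun b hb => ?_, List.pairwise_cons.mpr hs⟩
      rcases List.mem_cons.mp hb with rfl | hb
      · omega
      · exact le_trans (by omega) (hs.1 b hb)

theorem ordIns_ne_nil (t : Int) (l : List Int) : ordIns t l ≠ [] := by
  cases l with
  | nil => simp [ordIns]
  | cons h r => simp only [ordIns]; split <;> simp

-- updating the first occurrence of m is, up to permutation, erasing m and consing the new value
theorem set_index_perm (t : List Int) (m v : Int) (i : Nat)
    (hi : PySem.List.index? t m = some i) : (t.set i v).Perm (v :: t.erase m) := by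
  induction t generalizing i with
  | nil => simp [PySem.List.index?, List.idxOf?] at hi
  | cons x xs ih =>
    by_cases hx : x = m
    · subst hx
      rw [PySem.List.index?_cons_self] at hi
      cases hi
      simp [List.erase_cons_head]
    · rw [PySem.List.index?_cons_of_ne xs hx] at hi
      cases hj : PySem.List.index? xs m with
      | none => simp only [hj, Option.map_none] at hi; simp at hi
      | some j =>
        simp only [hj, Option.map_some] at hi
        cases hi
        rw [List.erase_cons_tail (by simpa using hx)]
        simpa using ((ih j hj).cons x).trans (List.Perm.swap v x _)

theorem getD_index (t : List Int) (m : Int) (i : Nat)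
    (hi : PySem.List.index? t m = some i) : t.getD i 0 = m := by
  obtain ⟨hk, h1, _⟩ := PySem.List.getElem_of_index?_eq_some hi
  simp [List.getD, List.getElem?_eq_getElem hk, h1]

-- the minimum of any permutation of a sorted nonempty list is its head
theorem min?_perm_sorted (t : List Int) (h : Int) (r : List Int)
    (hp : t.Perm (h :: r)) (hs : (h :: r).Pairwise (· ≤ ·)) :
    PySem.List.min? t (fun y => y) = some h := by
  cases hm : PySem.List.min? t (fun y => y) with
  | none =>
    rw [PySem.List.min?_eq_none_iff] at hm
    subst hm; exact absurd hp.symm (by simp)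
  | some m =>
    have hmem : m ∈ t := PySem.List.min?_mem hm
    have hmin : ∀ y ∈ t, m ≤ y := fun y hy => PySem.List.min?_isMin hm y hy
    have h1 : m ≤ h := hmin h (hp.mem_iff.mpr (by simp))
    have h2 : h ≤ m := by
      rw [List.pairwise_cons] at hs
      rcases List.mem_cons.mp (hp.mem_iff.mp hmem) with rfl | hmr
      · exact le_refl m
      · exact hs.1 m hmr
    have : m = h := le_antisymm h1 h2
    simp [this]

theorem sorted_le_getLast (l : List Int) : l.Pairwise (· ≤ ·) → ∀ (hne : l ≠ []) (y : Int),
    y ∈ l → y ≤ l.getLast hne := by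
  induction l with
  | nil => intro _ hne; exact absurd rfl hne
  | cons h r ih =>
    intro hs hne y hy
    rw [List.pairwise_cons] at hs
    cases r with
    | nil =>
      simp only [List.mem_singleton] at hy
      simp [List.getLast, hy]
    | cons h2 r2 =>
      rw [List.getLast_cons (by simp)]
      rcases List.mem_cons.mp hy with rfl | hy
      · exact le_trans (hs.1 h2 (by simp)) (ih hs.2 (by simp) h2 (by simp))
      · exact ih hs.2 (by simp) y hy

-- the maximum of any permutation of a sorted nonempty list is its last element
theorem max?_perm_sorted (t l : List Int) (hp : t.Perm l) (hs : l.Pairwise (· ≤ ·))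
    (hne : l ≠ []) : PySem.List.max? t (fun y => y) = some (l.getLast hne) := by
  cases hm : PySem.List.max? t (fun y => y) with
  | none =>
    rw [PySem.List.max?_eq_none_iff] at hm
    subst hm; exact absurd hp.symm (by simp [hne])
  | some m =>
    have hmem : m ∈ t := PySem.List.max?_mem hm
    have hmax : ∀ y ∈ t, y ≤ m := fun y hy => PySem.List.max?_isMax hm y hy
    have h1 : m ≤ l.getLast hne := sorted_le_getLast l hs hne m (hp.mem_iff.mp hmem)
    have h2 : l.getLast hne ≤ m := hmax _ (hp.mem_iff.mpr (l.getLast_mem hne))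
    have : m = l.getLast hne := le_antisymm h1 h2
    simp [this]

-- main loop invariant: A's till list stays a permutation of B's sorted load list
theorem loop_inv (cs : List Int) : ∀ (t l : List Int), t.Perm l → l.Pairwise (· ≤ ·) → l ≠ [] →
    ∃ t', cs.foldl stepA (some t) = some t' ∧
      t'.Perm (cs.foldl stepB l) ∧ (cs.foldl stepB l).Pairwise (· ≤ ·) ∧ cs.foldl stepB l ≠ [] := by
  induction cs with
  | nil => exact fun t l hp hs hne => ⟨t, rfl, hp, hs, hne⟩
  | cons c cs ih =>
    intro t l hp hs hne
    obtain ⟨h, r, rfl⟩ : ∃ h r, l = h :: r := by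
      cases l with | nil => exact absurd rfl hne | cons h r => exact ⟨h, r, rfl⟩
    have hmin : PySem.List.min? t (fun y => y) = some h := min?_perm_sorted t h r hp hs
    have hhm : h ∈ t := hp.mem_iff.mpr (by simp)
    obtain ⟨i, hi⟩ : ∃ i, PySem.List.index? t h = some i := by
      cases hidx : PySem.List.index? t h with
      | none =>
        rw [PySem.List.index?_eq_none_iff] at hidx
        exact absurd hhm hidx
      | some i => exact ⟨i, rfl⟩
    have hstepA : stepA (some t) c = some (t.set i (h + c)) := by
      simp only [stepA, hmin, hi, getD_index t h i hi]
    have hperm' : (t.set i (h + c)).Perm (ordIns (h + c) r) := by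
      refine ((set_index_perm t h (h + c) i hi).trans ?_).trans (ordIns_perm (h + c) r).symm
      exact ((hp.erase h).trans (by simp [List.erase_cons_head])).cons (h + c)
    have hs' : (ordIns (h + c) r).Pairwise (· ≤ ·) :=
      ordIns_sorted _ _ (List.pairwise_cons.mp hs).2
    simpa [List.foldl_cons, hstepA, stepB_cons] using
      ih (t.set i (h + c)) (ordIns (h + c) r) hperm' hs' (ordIns_ne_nil _ _)

-- n = 1: B's loop on a singleton just accumulates the sum
theorem foldB_singleton (cs : List Int) : ∀ s : Int, cs.foldl stepB [s] = [s + cs.sum] := by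
  induction cs with
  | nil => simp
  | cons c cs ih =>
    intro s
    simp only [List.foldl_cons, stepB_cons, ordIns]
    rw [ih (s + c)]
    simp [add_assoc]

theorem queue_time_spec : Claim_equal_queue_time := by
  intro customers n _ hpre
  unfold Spec_queue_time queue_time queue_time_alt
  by_cases hc : customers = []
  · simp [hc]
  · simp only [if_neg hc]
    have hn : 1 ≤ n := hpre.resolve_left hc
    have hrep : PySem.List.pyRepeat ([0] : List Int) n = List.replicate n.toNat 0 :=
      PySem.List.pyRepeat_singleton _ _
    by_cases h1 : n = 1
    · subst h1
      rw [if_pos rfl, hrep]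
      norm_num [List.replicate, foldB_singleton customers 0, PySem.List.pyGet?_neg_one]
    · rw [if_neg h1, hrep]
      have hnn : n.toNat ≠ 0 := by omega
      have hne : (List.replicate n.toNat (0 : Int)) ≠ [] := by
        simp [hnn]
      have hs : (List.replicate n.toNat (0 : Int)).Pairwise (· ≤ ·) :=
        List.pairwise_replicate.mpr (Or.inr (le_refl 0))
      obtain ⟨t', hA, hperm, hsort, hnil⟩ :=
        loop_inv customers (List.replicate n.toNat 0) (List.replicate n.toNat 0)
          (List.Perm.refl _) hs hne
      rw [hA]
      show (PySem.List.max? t' fun y => y).getD 0 = _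
      rw [max?_perm_sorted t' _ hperm hsort hnil,
        PySem.List.pyGet?_neg_one, List.getLast?_eq_getLast_of_ne_nil hnil]
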